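-- pv_equiv track=rewrite | github.com/sauremilk/drift | scripts/run_agent_loop_benchmark.py | _assert_distribution
-- ===== SOURCE A (Python) =====
-- from typing import Any
--
-- def _assert_distribution(
--     name: str,
--     auto_count: int,
--     review_count: int,
--     block_count: int,
--     assertions: dict[str, Any],
-- ) -> list[str]:
--     """Return list of assertion error strings (empty = all passed)."""
--     errors: list[str] = []
--     for key, expected in assertions.items():
--         if key == "auto_exact" and auto_count != expected:
--             errors.append(f"[{name}] auto_count={auto_count} != exact {expected}")
--         elif key == "auto_min" and auto_count < expected:
--             errors.append(f"[{name}] auto_count={auto_count} < min {expected}")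
--         elif key == "auto_max" and auto_count > expected:
--             errors.append(f"[{name}] auto_count={auto_count} > max {expected}")
--         elif key == "review_exact" and review_count != expected:
--             errors.append(f"[{name}] review_count={review_count} != exact {expected}")
--         elif key == "review_min" and review_count < expected:
--             errors.append(f"[{name}] review_count={review_count} < min {expected}")
--         elif key == "review_max" and review_count > expected:
--             errors.append(f"[{name}] review_count={review_count} > max {expected}")
--         elif key == "block_exact" and block_count != expected:
--             errors.append(f"[{name}] block_count={block_count} != exact {expected}")
--         elif key == "block_min" and block_count < expected:
--             errors.append(f"[{name}] block_count={block_count} < min {expected}")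
--         elif key == "block_max" and block_count > expected:
--             errors.append(f"[{name}] block_count={block_count} > max {expected}")
--     return errors
-- ===== SOURCE B (Python) =====
-- def _assert_distribution(name, auto_count, review_count, block_count, assertions):
--     """Return list of assertion error strings (empty = all passed)."""
--     counts = {"auto": auto_count, "review": review_count, "block": block_count}
--     rules = {
--         "exact": (lambda c, e: c != e, "!= exact"),
--         "min": (lambda c, e: c < e, "< min"),
--         "max": (lambda c, e: c > e, "> max"),
--     }
--     errors = []
--     for key, expected in assertions.items():
--         field, sep, cons = key.rpartition("_")
--         if sep and field in counts and cons in rules: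
--             bad, op = rules[cons]
--             c = counts[field]
--             if bad(c, expected):
--                 errors.append(f"[{name}] {field}_count={c} {op} {expected}")
--     return errors
-- ===== Notes on version B (the rewrite author's own statement) =====
-- stated objective: simpler
-- what changed: Replaces the nine-branch if/elif ladder with data-driven dispatch: each key is split at its last underscore via rpartition, the field is resolved through a counts table and the constraint through a rule table of (predicate, operator-text) pairs, in one pass in the same order.
import Mathlib
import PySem

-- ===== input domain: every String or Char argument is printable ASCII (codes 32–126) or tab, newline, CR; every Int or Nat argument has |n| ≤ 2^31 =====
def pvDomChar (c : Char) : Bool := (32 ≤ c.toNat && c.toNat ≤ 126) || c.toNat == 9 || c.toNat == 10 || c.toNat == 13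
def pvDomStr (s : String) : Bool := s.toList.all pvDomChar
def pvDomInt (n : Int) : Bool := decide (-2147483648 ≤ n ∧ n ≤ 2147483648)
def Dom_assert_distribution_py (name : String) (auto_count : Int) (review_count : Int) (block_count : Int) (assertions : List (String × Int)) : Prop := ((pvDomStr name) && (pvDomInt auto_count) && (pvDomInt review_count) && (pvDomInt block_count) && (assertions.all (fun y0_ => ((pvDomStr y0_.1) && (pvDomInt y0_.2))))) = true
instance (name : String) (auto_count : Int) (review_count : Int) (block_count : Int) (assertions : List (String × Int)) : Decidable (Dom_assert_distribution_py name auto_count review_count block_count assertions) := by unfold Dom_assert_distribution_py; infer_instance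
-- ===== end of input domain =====

-- B replaces A's nine-branch if/elif ladder by data-driven dispatch: two lookup tables
-- (field → count, constraint → (predicate, operator text)) and an rpartition of each key;
-- objective: simpler (same single pass, no speed claim).

-- ===== PORT A =====
-- One loop iteration of A's for-loop (the nine-branch elif ladder), transliterated.
def pvStepA (name : String) (auto_count review_count block_count : Int)
    (errors : List String) (kv : String × Int) : List String :=
  let key := kv.1
  let expected := kv.2
  if key = "auto_exact" ∧ auto_count ≠ expected then
    errors ++ ["[" ++ name ++ "] auto_count=" ++ PySem.Int.toStr auto_count ++ " != exact " ++ PySem.Int.toStr expected]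
  else if key = "auto_min" ∧ auto_count < expected then
    errors ++ ["[" ++ name ++ "] auto_count=" ++ PySem.Int.toStr auto_count ++ " < min " ++ PySem.Int.toStr expected]
  else if key = "auto_max" ∧ auto_count > expected then
    errors ++ ["[" ++ name ++ "] auto_count=" ++ PySem.Int.toStr auto_count ++ " > max " ++ PySem.Int.toStr expected]
  else if key = "review_exact" ∧ review_count ≠ expected then
    errors ++ ["[" ++ name ++ "] review_count=" ++ PySem.Int.toStr review_count ++ " != exact " ++ PySem.Int.toStr expected]
  else if key = "review_min" ∧ review_count < expected then
    errors ++ ["[" ++ name ++ "] review_count=" ++ PySem.Int.toStr review_count ++ " < min " ++ PySem.Int.toStr expected]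
  else if key = "review_max" ∧ review_count > expected then
    errors ++ ["[" ++ name ++ "] review_count=" ++ PySem.Int.toStr review_count ++ " > max " ++ PySem.Int.toStr expected]
  else if key = "block_exact" ∧ block_count ≠ expected then
    errors ++ ["[" ++ name ++ "] block_count=" ++ PySem.Int.toStr block_count ++ " != exact " ++ PySem.Int.toStr expected]
  else if key = "block_min" ∧ block_count < expected then
    errors ++ ["[" ++ name ++ "] block_count=" ++ PySem.Int.toStr block_count ++ " < min " ++ PySem.Int.toStr expected]
  else if key = "block_max" ∧ block_count > expected then
    errors ++ ["[" ++ name ++ "] block_count=" ++ PySem.Int.toStr block_count ++ " > max " ++ PySem.Int.toStr expected]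
  else errors

def assert_distribution_py (name : String) (auto_count : Int) (review_count : Int) (block_count : Int) (assertions : List (String × Int)) : List String :=
  assertions.foldl (pvStepA name auto_count review_count block_count) []

-- ===== PORT B =====
-- key.rpartition("_") restricted to the found case: splits at the LAST '_';
-- returns none exactly when there is no '_' (Python's sep == "" i.e. the `if sep` guard fails).
def pvRpart : List Char → Option (List Char × List Char)
  | [] => none
  | c :: rest =>
    match pvRpart rest with
    | some (f, t) => some (c :: f, t)
    | none => if c = '_' then some ([], rest) else none

-- One loop iteration of B's loop: rpartition the key, look up field and constraint rule.
def pvStepB (name : String) (auto_count review_count block_count : Int)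
    (errors : List String) (kv : String × Int) : List String :=
  let counts : List (String × Int) := [("auto", auto_count), ("review", review_count), ("block", block_count)]
  let rules : List (String × ((Int → Int → Bool) × String)) :=
    [("exact", (fun c e => c != e, "!= exact")),
     ("min",   (fun c e => decide (c < e), "< min")),
     ("max",   (fun c e => decide (c > e), "> max"))]
  match pvRpart kv.1.toList with
  | none => errors
  | some (f, t) =>
    let field := String.ofList f
    let cons := String.ofList t
    match counts.lookup field, rules.lookup cons with
    | some c, some (bad, op) =>
      if bad c kv.2 then
        errors ++ ["[" ++ name ++ "] " ++ field ++ "_count=" ++ PySem.Int.toStr c ++ " " ++ op ++ " " ++ PySem.Int.toStr kv.2]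
      else errors
    | _, _ => errors

def assert_distribution_py_alt (name : String) (auto_count : Int) (review_count : Int) (block_count : Int) (assertions : List (String × Int)) : List String :=
  assertions.foldl (pvStepB name auto_count review_count block_count) []

-- ===== PRECONDITION & SPEC =====
def Spec_assert_distribution_py (name : String) (auto_count : Int) (review_count : Int) (block_count : Int) (assertions : List (String × Int)) (out : List String) : Prop := out = assert_distribution_py_alt name auto_count review_count block_count assertions
instance (name : String) (auto_count : Int) (review_count : Int) (block_count : Int) (assertions : List (String × Int)) (out : List String) : Decidable (Spec_assert_distribution_py name auto_count review_count block_count assertions out) := by unfold Spec_assert_distribution_py; infer_instance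

-- ===== CLAIM (what is proved, stated in full; the proofs are below) =====
def Claim_equal_assert_distribution_py : Prop := ∀ (name : String) (auto_count : Int) (review_count : Int) (block_count : Int) (assertions : List (String × Int)), Dom_assert_distribution_py name auto_count review_count block_count assertions → Spec_assert_distribution_py name auto_count review_count block_count assertions (assert_distribution_py name auto_count review_count block_count assertions)

-- ===== LEMMAS AND PROOFS =====

lemma pvRpart_concat : ∀ (cs f t : List Char), pvRpart cs = some (f, t) → cs = f ++ '_' :: t := by
  intro cs
  induction cs with
  | nil => intro f t h; simp [pvRpart] at h
  | cons c rest ih =>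
    intro f t h
    simp only [pvRpart] at h
    cases hr : pvRpart rest with
    | some p =>
      obtain ⟨f', t'⟩ := p
      rw [hr] at h
      simp only [Option.some.injEq, Prod.mk.injEq] at h
      obtain ⟨hf, ht⟩ := h
      subst hf
      subst ht
      rw [ih f' t' hr]
      rfl
    | none =>
      rw [hr] at h
      by_cases hc : c = '_'
      · simp only [hc, if_pos] at h
        simp only [Option.some.injEq, Prod.mk.injEq] at h
        obtain ⟨hf, ht⟩ := h
        subst hf
        subst ht
        simp [hc]
      · simp [hc] at h

lemma pvStep_eq (name : String) (auto_count review_count block_count : Int)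
    (errors : List String) (kv : String × Int) :
    pvStepA name auto_count review_count block_count errors kv
      = pvStepB name auto_count review_count block_count errors kv := by
  obtain ⟨key, e⟩ := kv
  by_cases h1 : key = "auto_exact"
  · subst h1
    by_cases hc : auto_count ≠ e <;>
      simp [pvStepA, pvStepB, hc,
        show pvRpart ['a', 'u', 't', 'o', '_', 'e', 'x', 'a', 'c', 't'] = some (['a', 'u', 't', 'o'], ['e', 'x', 'a', 'c', 't']) from by decide,
        show String.ofList ['a', 'u', 't', 'o'] = "auto" from by decide,
        show String.ofList ['e', 'x', 'a', 'c', 't'] = "exact" from by decide,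
        List.lookup, String.append_assoc]
  by_cases h2 : key = "auto_min"
  · subst h2
    by_cases hc : auto_count < e <;>
      simp [pvStepA, pvStepB, hc,
        show pvRpart ['a', 'u', 't', 'o', '_', 'm', 'i', 'n'] = some (['a', 'u', 't', 'o'], ['m', 'i', 'n']) from by decide,
        show String.ofList ['a', 'u', 't', 'o'] = "auto" from by decide,
        show String.ofList ['m', 'i', 'n'] = "min" from by decide,
        List.lookup, String.append_assoc]
  by_cases h3 : key = "auto_max"
  · subst h3
    by_cases hc : auto_count > e <;>
      simp [pvStepA, pvStepB, hc,
        show pvRpart ['a', 'u', 't', 'o', '_', 'm', 'a', 'x'] = some (['a', 'u', 't', 'o'], ['m', 'a', 'x']) from by decide,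
        show String.ofList ['a', 'u', 't', 'o'] = "auto" from by decide,
        show String.ofList ['m', 'a', 'x'] = "max" from by decide,
        List.lookup, String.append_assoc]
  by_cases h4 : key = "review_exact"
  · subst h4
    by_cases hc : review_count ≠ e <;>
      simp [pvStepA, pvStepB, hc,
        show pvRpart ['r', 'e', 'v', 'i', 'e', 'w', '_', 'e', 'x', 'a', 'c', 't'] = some (['r', 'e', 'v', 'i', 'e', 'w'], ['e', 'x', 'a', 'c', 't']) from by decide,
        show String.ofList ['r', 'e', 'v', 'i', 'e', 'w'] = "review" from by decide,
        show String.ofList ['e', 'x', 'a', 'c', 't'] = "exact" from by decide,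
        List.lookup, String.append_assoc]
  by_cases h5 : key = "review_min"
  · subst h5
    by_cases hc : review_count < e <;>
      simp [pvStepA, pvStepB, hc,
        show pvRpart ['r', 'e', 'v', 'i', 'e', 'w', '_', 'm', 'i', 'n'] = some (['r', 'e', 'v', 'i', 'e', 'w'], ['m', 'i', 'n']) from by decide,
        show String.ofList ['r', 'e', 'v', 'i', 'e', 'w'] = "review" from by decide,
        show String.ofList ['m', 'i', 'n'] = "min" from by decide,
        List.lookup, String.append_assoc]
  by_cases h6 : key = "review_max"
  · subst h6
    by_cases hc : review_count > e <;>
      simp [pvStepA, pvStepB, hc,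
        show pvRpart ['r', 'e', 'v', 'i', 'e', 'w', '_', 'm', 'a', 'x'] = some (['r', 'e', 'v', 'i', 'e', 'w'], ['m', 'a', 'x']) from by decide,
        show String.ofList ['r', 'e', 'v', 'i', 'e', 'w'] = "review" from by decide,
        show String.ofList ['m', 'a', 'x'] = "max" from by decide,
        List.lookup, String.append_assoc]
  by_cases h7 : key = "block_exact"
  · subst h7
    by_cases hc : block_count ≠ e <;>
      simp [pvStepA, pvStepB, hc,
        show pvRpart ['b', 'l', 'o', 'c', 'k', '_', 'e', 'x', 'a', 'c', 't'] = some (['b', 'l', 'o', 'c', 'k'], ['e', 'x', 'a', 'c', 't']) from by decide,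
        show String.ofList ['b', 'l', 'o', 'c', 'k'] = "block" from by decide,
        show String.ofList ['e', 'x', 'a', 'c', 't'] = "exact" from by decide,
        List.lookup, String.append_assoc]
  by_cases h8 : key = "block_min"
  · subst h8
    by_cases hc : block_count < e <;>
      simp [pvStepA, pvStepB, hc,
        show pvRpart ['b', 'l', 'o', 'c', 'k', '_', 'm', 'i', 'n'] = some (['b', 'l', 'o', 'c', 'k'], ['m', 'i', 'n']) from by decide,
        show String.ofList ['b', 'l', 'o', 'c', 'k'] = "block" from by decide,
        show String.ofList ['m', 'i', 'n'] = "min" from by decide,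
        List.lookup, String.append_assoc]
  by_cases h9 : key = "block_max"
  · subst h9
    by_cases hc : block_count > e <;>
      simp [pvStepA, pvStepB, hc,
        show pvRpart ['b', 'l', 'o', 'c', 'k', '_', 'm', 'a', 'x'] = some (['b', 'l', 'o', 'c', 'k'], ['m', 'a', 'x']) from by decide,
        show String.ofList ['b', 'l', 'o', 'c', 'k'] = "block" from by decide,
        show String.ofList ['m', 'a', 'x'] = "max" from by decide,
        List.lookup, String.append_assoc]
  -- key is none of the nine recognized keys: both sides leave errors unchanged
  · simp only [pvStepA, pvStepB, h1, h2, h3, h4, h5, h6, h7, h8, h9, false_and, if_false]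
    cases hr : pvRpart key.toList with
    | none => simp
    | some p =>
      obtain ⟨f, t⟩ := p
      have hcat : key.toList = f ++ '_' :: t := pvRpart_concat _ _ _ hr
      have hkey : ∀ (F T : String), String.ofList f = F → String.ofList t = T →
          key.toList = F.toList ++ '_' :: T.toList := by
        intro F T hF hT
        rw [hcat, ← hF, ← hT]
        simp
      have hlk : ∀ (s lit : String), ¬ s = lit → (s == lit) = false := by
        intro s lit h
        simp [h]
      by_cases hfa : String.ofList f = "auto"
      · by_cases hta : String.ofList t = "exact"
        · exact absurd (String.toList_inj.mp (by rw [hkey _ _ hfa hta]; decide)) h1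
        by_cases htb : String.ofList t = "min"
        · exact absurd (String.toList_inj.mp (by rw [hkey _ _ hfa htb]; decide)) h2
        by_cases htc : String.ofList t = "max"
        · exact absurd (String.toList_inj.mp (by rw [hkey _ _ hfa htc]; decide)) h3
        · simp [List.lookup, hlk _ _ hta, hlk _ _ htb, hlk _ _ htc]
      by_cases hfb : String.ofList f = "review"
      · by_cases hta : String.ofList t = "exact"
        · exact absurd (String.toList_inj.mp (by rw [hkey _ _ hfb hta]; decide)) h4
        by_cases htb : String.ofList t = "min"
        · exact absurd (String.toList_inj.mp (by rw [hkey _ _ hfb htb]; decide)) h5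
        by_cases htc : String.ofList t = "max"
        · exact absurd (String.toList_inj.mp (by rw [hkey _ _ hfb htc]; decide)) h6
        · simp [List.lookup, hlk _ _ hta, hlk _ _ htb, hlk _ _ htc]
      by_cases hfc : String.ofList f = "block"
      · by_cases hta : String.ofList t = "exact"
        · exact absurd (String.toList_inj.mp (by rw [hkey _ _ hfc hta]; decide)) h7
        by_cases htb : String.ofList t = "min"
        · exact absurd (String.toList_inj.mp (by rw [hkey _ _ hfc htb]; decide)) h8
        by_cases htc : String.ofList t = "max"
        · exact absurd (String.toList_inj.mp (by rw [hkey _ _ hfc htc]; decide)) h9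
        · simp [List.lookup, hlk _ _ hta, hlk _ _ htb, hlk _ _ htc]
      · simp [List.lookup, hlk _ _ hfa, hlk _ _ hfb, hlk _ _ hfc]

-- ===== VERDICT (by name: the statement is the Claim_ definition above) =====
theorem assert_distribution_py_spec : Claim_equal_assert_distribution_py := by
  intro name a r b assertions _
  unfold Spec_assert_distribution_py assert_distribution_py assert_distribution_py_alt
  suffices h : ∀ (l : List (String × Int)) (acc : List String),
      l.foldl (pvStepA name a r b) acc = l.foldl (pvStepB name a r b) acc from h assertions []
  intro l
  induction l with
  | nil => intro acc; rfl
  | cons kv rest ih =>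
    intro acc
    simp only [List.foldl_cons, pvStep_eq]
    exact ih _
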